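-- pv_equiv track=rewrite | github.com/skrauss11/GEO-Prospecting-Agent | shared/benchmarks.py | _normalize_vertical
-- ===== SOURCE A (Python) =====
-- def _normalize_vertical(vertical: str) -> str:
--     v = vertical.lower().strip().replace(" ", "_").replace("/", "_")
--     mapping = {
--         "professional_services": ["professional_services", "law", "legal", "consulting", "agency", "agencies"],
--         "dtc": ["dtc", "ecommerce", "e_commerce", "retail", "consumer"],
--         "saas": ["saas", "b2b", "tech", "software"],
--     }
--     for canonical, aliases in mapping.items():
--         if v in aliases:
--             return canonical
--     return "default"
-- ===== SOURCE B (Python) =====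
-- # Binary search over one sorted flat (alias, canonical) table instead of
-- # scanning per-category alias lists.
-- _PAIRS = [
--     ("agencies", "professional_services"),
--     ("agency", "professional_services"),
--     ("b2b", "saas"),
--     ("consulting", "professional_services"),
--     ("consumer", "dtc"),
--     ("dtc", "dtc"),
--     ("e_commerce", "dtc"),
--     ("ecommerce", "dtc"),
--     ("law", "professional_services"),
--     ("legal", "professional_services"),
--     ("professional_services", "professional_services"),
--     ("retail", "dtc"),
--     ("saas", "saas"),
--     ("software", "saas"),
--     ("tech", "saas"),
-- ]
--
-- def _normalize_vertical(vertical: str) -> str: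
--     v = vertical.lower().strip().replace(" ", "_").replace("/", "_")
--     lo, hi = 0, len(_PAIRS)
--     while lo < hi:
--         mid = (lo + hi) // 2
--         if _PAIRS[mid][0] < v:
--             lo = mid + 1
--         else:
--             hi = mid
--     if lo < len(_PAIRS) and _PAIRS[lo][0] == v:
--         return _PAIRS[lo][1]
--     return "default"
-- ===== Notes on version B (the rewrite author's own statement) =====
-- stated objective: alternative
-- what changed: The per-category loop with linear membership scans over alias lists is replaced by lower-bound binary search over a single lexicographically sorted flat (alias, canonical) table, then one equality check at the found position.
import Mathlib
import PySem

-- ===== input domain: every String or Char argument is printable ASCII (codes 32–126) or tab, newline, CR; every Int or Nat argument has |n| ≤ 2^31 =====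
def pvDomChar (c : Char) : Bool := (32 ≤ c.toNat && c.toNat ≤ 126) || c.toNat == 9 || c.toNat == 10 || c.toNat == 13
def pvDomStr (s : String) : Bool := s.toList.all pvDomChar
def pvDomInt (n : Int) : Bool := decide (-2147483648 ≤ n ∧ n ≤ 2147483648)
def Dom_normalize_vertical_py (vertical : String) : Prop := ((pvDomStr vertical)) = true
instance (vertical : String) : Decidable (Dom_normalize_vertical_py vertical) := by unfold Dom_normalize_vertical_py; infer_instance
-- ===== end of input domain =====

-- B replaces A's per-category linear scans by lower-bound binary search over one sorted flat (alias, canonical) table (alternative algorithm; same observable behaviour).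

-- ===== PORT A =====
-- the for-loop over mapping.items() with early return
def pvALoop (items : List (String × List String)) (v : String) : String :=
  match items with
  | [] => "default"
  | (canonical, aliases) :: rest =>
    if aliases.contains v then canonical else pvALoop rest v

def normalize_vertical_py (vertical : String) : String :=
  let v := PySem.Str.replace (PySem.Str.replace (PySem.Str.strip (PySem.Str.lower vertical)) " " "_") "/" "_"
  pvALoop [("professional_services", ["professional_services", "law", "legal", "consulting", "agency", "agencies"]),
           ("dtc", ["dtc", "ecommerce", "e_commerce", "retail", "consumer"]),
           ("saas", ["saas", "b2b", "tech", "software"])] v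

-- ===== PORT B =====
-- the module-level sorted table _PAIRS of Source B
def pvPairs : List (String × String) :=
  [("agencies", "professional_services"),
   ("agency", "professional_services"),
   ("b2b", "saas"),
   ("consulting", "professional_services"),
   ("consumer", "dtc"),
   ("dtc", "dtc"),
   ("e_commerce", "dtc"),
   ("ecommerce", "dtc"),
   ("law", "professional_services"),
   ("legal", "professional_services"),
   ("professional_services", "professional_services"),
   ("retail", "dtc"),
   ("saas", "saas"),
   ("software", "saas"),
   ("tech", "saas")]

-- the while-loop of Source B: lower-bound binary search, returns the final lo.
-- fuel = hi - lo makes the recursion structural; each iteration shrinks hi - lo by ≥ 1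
def pvBSearchGo (v : String) : Nat → Nat → Nat → Nat
  | 0, lo, _ => lo
  | Nat.succ n, lo, hi =>
    if lo < hi then
      let mid := (lo + hi) / 2
      -- Python's str "<" = code-point lex order = PySem.Chars.strLt on .toList (exact)
      if PySem.Chars.strLt (pvPairs.getD mid ("", "")).1.toList v.toList then
        pvBSearchGo v n (mid + 1) hi
      else
        pvBSearchGo v n lo mid
    else lo

def pvBSearch (v : String) (lo hi : Nat) : Nat :=
  pvBSearchGo v (hi - lo) lo hi

def normalize_vertical_py_alt (vertical : String) : String :=
  let v := PySem.Str.replace (PySem.Str.replace (PySem.Str.strip (PySem.Str.lower vertical)) " " "_") "/" "_"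
  let lo := pvBSearch v 0 pvPairs.length
  if lo < pvPairs.length && (pvPairs.getD lo ("", "")).1 == v then
    (pvPairs.getD lo ("", "")).2
  else "default"

-- ===== PRECONDITION & SPEC =====
def Spec_normalize_vertical_py (vertical : String) (out : String) : Prop := out = normalize_vertical_py_alt vertical
instance (vertical : String) (out : String) : Decidable (Spec_normalize_vertical_py vertical out) := by unfold Spec_normalize_vertical_py; infer_instance

-- ===== CLAIM (what is proved, stated in full; the proofs are below) =====
def Claim_equal_normalize_vertical_py : Prop := ∀ (vertical : String), Dom_normalize_vertical_py vertical → Spec_normalize_vertical_py vertical (normalize_vertical_py vertical)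

-- ===== LEMMAS AND PROOFS =====
-- the 15 alias strings (keys of pvPairs = all aliases of A's mapping)
def pvAliases : List String :=
  ["agencies", "agency", "b2b", "consulting", "consumer", "dtc", "e_commerce",
   "ecommerce", "law", "legal", "professional_services", "retail", "saas",
   "software", "tech"]

lemma pvPairs_fst_mem : ∀ i : Nat, i < 15 → (pvPairs.getD i ("", "")).1 ∈ pvAliases := by decide

-- if v is none of the aliases, B's final equality check fails, so B returns "default"
lemma pvB_default (v : String) (hv : v ∉ pvAliases) :
    (let lo := pvBSearch v 0 pvPairs.length
     if lo < pvPairs.length && (pvPairs.getD lo ("", "")).1 == v then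
       (pvPairs.getD lo ("", "")).2
     else "default") = "default" := by
  set lo := pvBSearch v 0 pvPairs.length with hlo
  by_cases h : lo < pvPairs.length
  · have hb : ((pvPairs.getD lo ("", "")).1 == v) = false :=
      beq_eq_false_iff_ne.mpr fun he =>
        hv (he ▸ pvPairs_fst_mem lo (by simpa [pvPairs] using h))
    simp only [hb, Bool.and_false, Bool.false_eq_true, if_false]
  · simp [h]

-- if v is none of the aliases, A's loop returns "default"
lemma pvA_default (v : String) (hv : v ∉ pvAliases) :
    pvALoop [("professional_services", ["professional_services", "law", "legal", "consulting", "agency", "agencies"]),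
             ("dtc", ["dtc", "ecommerce", "e_commerce", "retail", "consumer"]),
             ("saas", ["saas", "b2b", "tech", "software"])] v = "default" := by
  have h : v ≠ "professional_services" ∧ v ≠ "law" ∧ v ≠ "legal" ∧ v ≠ "consulting" ∧
      v ≠ "agency" ∧ v ≠ "agencies" ∧ v ≠ "dtc" ∧ v ≠ "ecommerce" ∧ v ≠ "e_commerce" ∧
      v ≠ "retail" ∧ v ≠ "consumer" ∧ v ≠ "saas" ∧ v ≠ "b2b" ∧ v ≠ "tech" ∧ v ≠ "software" := by
    simp only [pvAliases, List.mem_cons, List.not_mem_nil, or_false] at hv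
    push Not at hv
    tauto
  obtain ⟨h1, h2, h3, h4, h5, h6, h7, h8, h9, h10, h11, h12, h13, h14, h15⟩ := h
  simp [pvALoop, h1, h2, h3, h4, h5, h6, h7, h8, h9, h10, h11, h12, h13, h14, h15]

-- for every normalized string v the loop and the binary search agree
set_option maxRecDepth 4000 in
set_option maxHeartbeats 1000000 in
lemma pvLoop_eq_bsearch (v : String) :
    pvALoop [("professional_services", ["professional_services", "law", "legal", "consulting", "agency", "agencies"]),
             ("dtc", ["dtc", "ecommerce", "e_commerce", "retail", "consumer"]),
             ("saas", ["saas", "b2b", "tech", "software"])] v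
      = (let lo := pvBSearch v 0 pvPairs.length
         if lo < pvPairs.length && (pvPairs.getD lo ("", "")).1 == v then
           (pvPairs.getD lo ("", "")).2
         else "default") := by
  by_cases hv : v ∈ pvAliases
  · simp only [pvAliases, List.mem_cons, List.not_mem_nil, or_false] at hv
    rcases hv with rfl | rfl | rfl | rfl | rfl | rfl | rfl | rfl | rfl | rfl | rfl | rfl | rfl | rfl | rfl <;> decide
  · rw [pvA_default v hv, pvB_default v hv]

-- ===== VERDICT (by name: the statement is the Claim_ definition above) =====
theorem normalize_vertical_py_spec : Claim_equal_normalize_vertical_py := by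
  intro vertical _
  unfold Spec_normalize_vertical_py normalize_vertical_py normalize_vertical_py_alt
  exact pvLoop_eq_bsearch _
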